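-- pv_equiv track=rewrite | github.com/alvinng222/cs50-2019 | helpers.py | substrings
-- ===== SOURCE A (Python) =====
-- def substrings(a, b, n):
--     """Return substrings of length n in both a and b"""
--     # TODO
--
--     ms = []
--     for u in range(len(a)-n+1):
--         ms.append(a[u:u + n])
--
--     ns = []
--     for u in range(len(b)-n+1):
--         ns.append(b[u:u + n])
--
--     matched = []
--     for x in ms:
--         for y in ns:
--             if x == y:
--                 if x not in matched:
--                     matched.append(x)
--     return matched
-- ===== SOURCE B (Python) =====
-- def substrings(a, b, n):
--     """Return substrings of length n in both a and b"""
--     set_b = {b[u:u + n] for u in range(len(b) - n + 1)}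
--     first_index = {}
--     for u in range(len(a) - n + 1):
--         s = a[u:u + n]
--         if s not in first_index:
--             first_index[s] = u
--     common = set(first_index) & set_b
--     return sorted(common, key=first_index.get)
-- ===== Notes on version B (the rewrite author's own statement) =====
-- stated objective: faster
-- what changed: Replaces A's nested element-by-element scan (with a linear 'not in matched' check) by hash tables: a set of b's substrings, a dict mapping each substring of a to its first index, a set intersection, and a sort keyed by that first index which restores first-appearance order.
import Mathlib
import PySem

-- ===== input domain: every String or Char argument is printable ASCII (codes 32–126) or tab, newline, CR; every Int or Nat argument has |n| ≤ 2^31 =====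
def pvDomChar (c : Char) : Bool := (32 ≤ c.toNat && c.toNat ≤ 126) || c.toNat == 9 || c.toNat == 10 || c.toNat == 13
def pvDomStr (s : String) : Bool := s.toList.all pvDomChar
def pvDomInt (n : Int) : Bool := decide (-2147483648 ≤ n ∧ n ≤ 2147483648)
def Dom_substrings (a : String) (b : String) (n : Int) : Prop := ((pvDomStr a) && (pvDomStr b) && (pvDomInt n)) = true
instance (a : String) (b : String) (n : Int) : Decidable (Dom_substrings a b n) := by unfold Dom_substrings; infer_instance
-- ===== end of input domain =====

-- B replaces A's nested element-by-element scan by a substring-index table, a set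
-- intersection and a sort on recovered first indices (objective: faster).

-- ===== PORT A =====
def substrings (a : String) (b : String) (n : Int) : List String :=
  let ms := (PySem.List.pyRange 0 (PySem.Str.len a - n + 1) 1).foldl
    (fun acc u => acc ++ [PySem.Str.slice a (some u) (some (u + n))]) []
  let ns := (PySem.List.pyRange 0 (PySem.Str.len b - n + 1) 1).foldl
    (fun acc u => acc ++ [PySem.Str.slice b (some u) (some (u + n))]) []
  ms.foldl (fun matched x =>
    ns.foldl (fun m y =>
      if x == y then (if m.contains x then m else m ++ [x]) else m) matched) []

-- ===== PORT B =====
def substrings_alt (a : String) (b : String) (n : Int) : List String :=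
  let set_b : PySem.Set String := PySem.Set.ofList
    ((PySem.List.pyRange 0 (PySem.Str.len b - n + 1) 1).map
      (fun u => PySem.Str.slice b (some u) (some (u + n))))
  let first_index : PySem.Dict String Int :=
    (PySem.List.pyRange 0 (PySem.Str.len a - n + 1) 1).foldl
      (fun d u =>
        if d.contains (PySem.Str.slice a (some u) (some (u + n))) then d
        else d.insert (PySem.Str.slice a (some u) (some (u + n))) u)
      PySem.Dict.empty
  let common : PySem.Set String :=
    PySem.Set.inter (PySem.Set.ofList first_index.keys) set_b
  PySem.List.sorted common (fun s => first_index.getD s 0)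

-- ===== PRECONDITION & SPEC =====
def Spec_substrings (a : String) (b : String) (n : Int) (out : List String) : Prop := out = substrings_alt a b n
instance (a : String) (b : String) (n : Int) (out : List String) : Decidable (Spec_substrings a b n out) := by unfold Spec_substrings; infer_instance

-- ===== CLAIM (what is proved, stated in full; the proofs are below) =====
def Claim_equal_substrings : Prop := ∀ (a : String) (b : String) (n : Int), Dom_substrings a b n → Spec_substrings a b n (substrings a b n)

-- ===== LEMMAS AND PROOFS =====

-- A's append loop builds the map of the range.
theorem pvFoldlAppend {α β : Type} (l : List α) (g : α → β) (init : List β) :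
    l.foldl (fun acc u => acc ++ [g u]) init = init ++ l.map g := by
  induction l generalizing init with
  | nil => simp
  | cons x xs ih => simp [List.foldl_cons, ih]

-- A's inner loop over ns is one conditional Set.add.
theorem pvInner (ns : List String) (x : String) (m : List String) :
    ns.foldl (fun m y => if x == y then (if m.contains x then m else m ++ [x]) else m) m
      = if ns.contains x then PySem.Set.add m x else m := by
  induction ns generalizing m with
  | nil => simp
  | cons y ys ih =>
    by_cases hxy : x = y
    · subst hxy
      simp only [List.foldl_cons, beq_self_eq_true, if_pos, List.contains_cons]
      rw [ih]
      have hstep : (if m.contains x then m else m ++ [x]) = PySem.Set.add m x := by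
        rw [PySem.Set.add_eq_ite]
        by_cases hm : x ∈ m <;> simp [hm]
      have hmem : x ∈ PySem.Set.add m x := by
        rw [PySem.Set.add_eq_ite]
        by_cases hm : x ∈ m <;> simp [hm]
      rw [hstep]
      by_cases hys : ys.contains x
      · rw [if_pos hys, if_pos (by simp),
          PySem.Set.add_of_mem hmem]
      · simp
    · have hxyb : (x == y) = false := by simp [hxy]
      simp only [List.foldl_cons, hxyb, Bool.false_eq_true, if_false, List.contains_cons]
      rw [ih]
      simp

-- A's outer loop is a fold of Set.add over the filtered list.
theorem pvOuter (ms : List String) (p : String → Bool) (s : List String) :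
    ms.foldl (fun m x => if p x then PySem.Set.add m x else m) s
      = (ms.filter p).foldl PySem.Set.add s := by
  induction ms generalizing s with
  | nil => rfl
  | cons x xs ih =>
    by_cases hp : p x <;> simp [List.foldl_cons, hp, ih]

theorem pvOfListSnoc (xs : List String) (x : String) :
    PySem.Set.ofList (xs ++ [x]) = PySem.Set.add (PySem.Set.ofList xs) x := by
  rw [PySem.Set.ofList_eq_foldl, PySem.Set.ofList_eq_foldl, List.foldl_append]
  rfl

theorem pvOfListNodup (xs : List String) (h : xs.Nodup) : PySem.Set.ofList xs = xs := by
  induction xs using List.reverseRecOn with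
  | nil => rfl
  | append_singleton xs x ih =>
    rcases List.nodup_append.mp h with ⟨h1, h2, h3⟩
    rw [pvOfListSnoc, ih h1, PySem.Set.add_of_not_mem]
    intro hx
    exact h3 x hx x (by simp) rfl

theorem pvOfListFilter (xs : List String) (p : String → Bool) :
    PySem.Set.ofList (xs.filter p) = (PySem.Set.ofList xs).filter p := by
  induction xs using List.reverseRecOn with
  | nil => rfl
  | append_singleton xs x ih =>
    by_cases hp : p x
    · have hfil : (xs ++ [x]).filter p = xs.filter p ++ [x] := by
        simp [List.filter_append, hp]
      rw [hfil, pvOfListSnoc, pvOfListSnoc, ih]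
      by_cases hmem : x ∈ PySem.Set.ofList xs
      · rw [PySem.Set.add_of_mem hmem,
          PySem.Set.add_of_mem (List.mem_filter.mpr ⟨hmem, hp⟩)]
      · rw [PySem.Set.add_of_not_mem hmem,
          PySem.Set.add_of_not_mem (fun hx => hmem (List.mem_filter.mp hx).1),
          List.filter_append]
        simp [hp]
    · have hfil : (xs ++ [x]).filter p = xs.filter p := by
        simp [List.filter_append, hp]
      rw [hfil, ih, pvOfListSnoc]
      by_cases hmem : x ∈ PySem.Set.ofList xs
      · rw [PySem.Set.add_of_mem hmem]
      · rw [PySem.Set.add_of_not_mem hmem, List.filter_append]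
        simp [hp]

-- the first_index loop invariant: keys are the dedup of the slices seen, and
-- the stored first indices are strictly increasing along the key list
theorem pvFi (f : Int → String) (l : List Int) (d : PySem.Dict String Int)
    (hl : l.Pairwise (· < ·))
    (hd : d.keys.Pairwise (fun x y => d.getD x 0 < d.getD y 0))
    (hb : ∀ x ∈ d.keys, ∀ u ∈ l, d.getD x 0 < u) :
    (l.foldl (fun d u => if d.contains (f u) then d else d.insert (f u) u) d).keys
        = PySem.Set.update d.keys (l.map f)
      ∧ (l.foldl (fun d u => if d.contains (f u) then d else d.insert (f u) u) d).keys.Pairwise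
          (fun x y => (l.foldl (fun d u => if d.contains (f u) then d else d.insert (f u) u) d).getD x 0
            < (l.foldl (fun d u => if d.contains (f u) then d else d.insert (f u) u) d).getD y 0) := by
  induction l generalizing d with
  | nil => exact ⟨rfl, hd⟩
  | cons u l' ih =>
    rcases List.pairwise_cons.mp hl with ⟨hu, hl'⟩
    by_cases hc : d.contains (f u)
    · have hmem : f u ∈ d.keys := (PySem.Dict.contains_iff_mem_keys d (f u)).mp hc
      have step : (u :: l').foldl (fun d u => if d.contains (f u) then d else d.insert (f u) u) d
          = l'.foldl (fun d u => if d.contains (f u) then d else d.insert (f u) u) d := by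
        simp [hc]
      have upd : PySem.Set.update d.keys ((u :: l').map f)
          = PySem.Set.update d.keys (l'.map f) := by
        show PySem.Set.update (PySem.Set.add d.keys (f u)) (l'.map f)
          = PySem.Set.update d.keys (l'.map f)
        rw [PySem.Set.add_of_mem hmem]
      rw [step, upd]
      exact ih d hl' hd (fun x hx u' hu' => hb x hx u' (List.mem_cons_of_mem u hu'))
    · have hnmem : f u ∉ d.keys := fun h =>
        hc ((PySem.Dict.contains_iff_mem_keys d (f u)).mpr h)
      have hkeys : (d.insert (f u) u).keys = d.keys ++ [f u] :=
        PySem.Dict.keys_insert_of_not_contains d u (by simpa using hc)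
      have hgetD : ∀ x, (d.insert (f u) u).getD x 0 = if x = f u then u else d.getD x 0 :=
        fun x => PySem.Dict.getD_insert d (f u) x u 0
      have hd' : (d.insert (f u) u).keys.Pairwise
          (fun x y => (d.insert (f u) u).getD x 0 < (d.insert (f u) u).getD y 0) := by
        rw [hkeys]
        rw [List.pairwise_append]
        refine ⟨?_, by simp, ?_⟩
        · refine hd.imp_of_mem ?_
          intro x y hx hy hxy
          rw [hgetD x, hgetD y, if_neg (by rintro rfl; exact hnmem hx),
            if_neg (by rintro rfl; exact hnmem hy)]
          exact hxy
        · intro x hx y hy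
          have hy' : y = f u := by simpa using hy
          rw [hgetD x, hgetD y, if_neg (by rintro rfl; exact hnmem hx), if_pos hy']
          exact hb x hx u (List.mem_cons_self)
      have hb' : ∀ x ∈ (d.insert (f u) u).keys, ∀ u' ∈ l',
          (d.insert (f u) u).getD x 0 < u' := by
        intro x hx u' hu'
        rw [hkeys] at hx
        rcases List.mem_append.mp hx with hx | hx
        · rw [hgetD x, if_neg (by rintro rfl; exact hnmem hx)]
          exact hb x hx u' (List.mem_cons_of_mem u hu')
        · have hx' : x = f u := by simpa using hx
          rw [hgetD x, if_pos hx']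
          exact hu u' hu'
      have step : (u :: l').foldl (fun d u => if d.contains (f u) then d else d.insert (f u) u) d
          = l'.foldl (fun d u => if d.contains (f u) then d else d.insert (f u) u)
              (d.insert (f u) u) := by
        simp [hc]
      have upd : PySem.Set.update d.keys ((u :: l').map f)
          = PySem.Set.update (d.insert (f u) u).keys (l'.map f) := by
        show PySem.Set.update (PySem.Set.add d.keys (f u)) (l'.map f)
          = PySem.Set.update (d.insert (f u) u).keys (l'.map f)
        rw [PySem.Set.add_of_not_mem hnmem, hkeys]
      rw [step, upd]
      exact ih (d.insert (f u) u) hl' hd' hb'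

theorem pvUpdateNil (l : List String) :
    PySem.Set.update ([] : PySem.Set String) l = PySem.Set.ofList l := by
  rw [PySem.Set.ofList_eq_foldl]; rfl

theorem pvContainsOfList (ys : List String) (x : String) :
    PySem.Set.contains (PySem.Set.ofList ys) x = ys.contains x := by
  by_cases h : x ∈ ys
  · have h1 : x ∈ PySem.Set.ofList ys := (PySem.Set.mem_ofList ys x).mpr h
    show (PySem.Set.ofList ys).contains x = ys.contains x
    simp [h, h1]
  · have h1 : x ∉ PySem.Set.ofList ys := fun hx => h ((PySem.Set.mem_ofList ys x).mp hx)
    show (PySem.Set.ofList ys).contains x = ys.contains x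
    simp [h, h1]

-- ===== VERDICT (by name: the statement is the Claim_ definition above) =====
theorem substrings_spec : Claim_equal_substrings := by
  intro a b n _
  show substrings a b n = substrings_alt a b n
  simp only [substrings, substrings_alt]
  set f : Int → String := fun u => PySem.Str.slice a (some u) (some (u + n)) with hf
  set g : Int → String := fun u => PySem.Str.slice b (some u) (some (u + n)) with hg
  set ra := PySem.List.pyRange 0 (PySem.Str.len a - n + 1) 1 with hra
  set rb := PySem.List.pyRange 0 (PySem.Str.len b - n + 1) 1 with hrb
  set ms := ra.map f with hms
  set ns := rb.map g with hns
  rw [pvFoldlAppend ra f [], pvFoldlAppend rb g [], List.nil_append, List.nil_append]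
  -- A side: inner loop, then outer loop
  have hinner : (fun (matched : List String) x =>
      ns.foldl (fun m y => if x == y then (if m.contains x then m else m ++ [x]) else m) matched)
      = fun matched x => if ns.contains x then PySem.Set.add matched x else matched := by
    funext m x
    exact pvInner ns x m
  rw [hinner, pvOuter ms (fun x => ns.contains x) [], ← PySem.Set.ofList_eq_foldl]
  -- B side: the first_index invariant
  obtain ⟨hk, hpw⟩ := pvFi f ra PySem.Dict.empty
    (PySem.List.pairwise_lt_pyRange_one 0 (PySem.Str.len a - n + 1))
    (by simp) (by simp)
  set D := ra.foldl (fun d u => if d.contains (f u) then d else d.insert (f u) u)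
    PySem.Dict.empty with hD
  rw [PySem.Dict.keys_empty, pvUpdateNil] at hk
  have hnodup : D.keys.Nodup := hpw.imp (by rintro x y h rfl; exact lt_irrefl _ h)
  -- common is a filter of D.keys
  have hcommon : PySem.Set.inter (PySem.Set.ofList D.keys) (PySem.Set.ofList ns)
      = D.keys.filter (fun x => PySem.Set.contains (PySem.Set.ofList ns) x) := by
    rw [pvOfListNodup D.keys hnodup]; rfl
  rw [hcommon]
  -- the filtered key list is already in strictly increasing first-index order
  have hsorted : PySem.List.sorted
      (D.keys.filter (fun x => PySem.Set.contains (PySem.Set.ofList ns) x))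
      (fun s => D.getD s 0)
      = D.keys.filter (fun x => PySem.Set.contains (PySem.Set.ofList ns) x) :=
    PySem.List.sorted_eq_self_of_pairwise _ _ ((hpw.filter _).imp le_of_lt)
  rw [hsorted, hk, ← pvOfListFilter]
  congr 1
  exact List.filter_congr (fun x _ => (pvContainsOfList ns x).symm)
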